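-- pv_equiv track=rewrite | github.com/usercrixus/CCppToolsComplement | srcs/script/verifyJson.py | find_duplicate_output_makefiles
-- ===== SOURCE A (Python) =====
-- from typing import Any, Callable
--
-- JsonObject = dict[str, Any]
--
-- def find_duplicate_output_makefiles(entries: list[JsonObject]) -> list[str]:
--     errors: list[str] = []
--     seen: dict[str, int] = {}
--     for index, entry in enumerate(entries):
--         output_makefile = entry.get("output_makefile")
--         if output_makefile in seen:
--             first = seen[output_makefile]
--             errors.append(
--                 f"[entry {index}] duplicate output_makefile '{output_makefile}' (already used by entry {first})."
--             )
--         else: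
--             seen[output_makefile] = index
--     return errors
-- ===== SOURCE B (Python) =====
-- def find_duplicate_output_makefiles(entries):
--     errors = []
--     firsts = {}
--     for index, entry in enumerate(entries):
--         key = entry.get("output_makefile")
--         if key not in firsts:
--             firsts[key] = index
--     for index, entry in enumerate(entries):
--         key = entry.get("output_makefile")
--         first = firsts[key]
--         if first != index:
--             errors.append(
--                 f"[entry {index}] duplicate output_makefile '{key}' (already used by entry {first})."
--             )
--     return errors
-- ===== Notes on version B (the rewrite author's own statement) =====
-- stated objective: alternative
-- what changed: Replaces the single pass that interleaves dict maintenance with error emission by two independent passes: one that records only the first index of each output_makefile value, and a second that emits an error for every entry whose index is not that first index.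
import Mathlib
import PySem

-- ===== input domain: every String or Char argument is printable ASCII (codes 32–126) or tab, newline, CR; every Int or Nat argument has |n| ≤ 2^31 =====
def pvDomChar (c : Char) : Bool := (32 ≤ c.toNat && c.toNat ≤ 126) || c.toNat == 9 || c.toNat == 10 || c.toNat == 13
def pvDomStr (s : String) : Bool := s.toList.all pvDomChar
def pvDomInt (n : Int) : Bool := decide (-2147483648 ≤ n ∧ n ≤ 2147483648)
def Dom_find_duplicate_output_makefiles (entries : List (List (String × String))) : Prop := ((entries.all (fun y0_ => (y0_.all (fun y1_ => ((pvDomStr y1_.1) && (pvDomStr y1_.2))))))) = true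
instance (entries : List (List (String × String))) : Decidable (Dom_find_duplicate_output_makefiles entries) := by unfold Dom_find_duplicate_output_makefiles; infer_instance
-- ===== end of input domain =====

-- B replaces A's single pass (dict-and-emit interleaved) by two independent passes:
-- record the first index of every output_makefile value, then emit one error per
-- non-first occurrence; same cost, plainer decomposition ("alternative").

-- shared helpers: entry.get("output_makefile") and the f-string (str(None) = "None")
def pvKey (entry : List (String × String)) : Option String :=
  (PySem.Dict.mk entry).get? "output_makefile"

def pvOptStr : Option String → String
  | none => "None"
  | some s => s

def pvMsg (index : Int) (v : Option String) (first : Int) : String :=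
  "[entry " ++ PySem.Int.toStr index ++ "] duplicate output_makefile '" ++ pvOptStr v ++
    "' (already used by entry " ++ PySem.Int.toStr first ++ ")."

-- ===== PORT A =====
-- loop body of A: emit if seen, else record
def pvStepA (st : List String × PySem.Dict (Option String) Int)
    (p : Int × List (String × String)) : List String × PySem.Dict (Option String) Int :=
  match st.2.get? (pvKey p.2) with
  | some first => (st.1 ++ [pvMsg p.1 (pvKey p.2) first], st.2)
  | none => (st.1, st.2.insert (pvKey p.2) p.1)

def find_duplicate_output_makefiles (entries : List (List (String × String))) : List String :=
  ((PySem.List.enumerate entries 0).foldl pvStepA ([], PySem.Dict.empty)).1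

-- ===== PORT B =====
-- first pass of B: keep only the first index of each key
def pvStepB (d : PySem.Dict (Option String) Int)
    (p : Int × List (String × String)) : PySem.Dict (Option String) Int :=
  if d.contains (pvKey p.2) then d else d.insert (pvKey p.2) p.1

def find_duplicate_output_makefiles_alt (entries : List (List (String × String))) : List String :=
  let firsts := (PySem.List.enumerate entries 0).foldl pvStepB PySem.Dict.empty
  -- second pass: firsts[key] always exists (every key was inserted in pass one), so getD is exact
  (PySem.List.enumerate entries 0).foldl (fun errors p =>
    let first := firsts.getD (pvKey p.2) 0
    if first ≠ p.1 then errors ++ [pvMsg p.1 (pvKey p.2) first] else errors) []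

-- ===== PRECONDITION & SPEC =====
def Spec_find_duplicate_output_makefiles (entries : List (List (String × String))) (out : List String) : Prop := out = find_duplicate_output_makefiles_alt entries
instance (entries : List (List (String × String))) (out : List String) : Decidable (Spec_find_duplicate_output_makefiles entries out) := by unfold Spec_find_duplicate_output_makefiles; infer_instance

-- ===== CLAIM (what is proved, stated in full; the proofs are below) =====
def Claim_equal_find_duplicate_output_makefiles : Prop := ∀ (entries : List (List (String × String))), Dom_find_duplicate_output_makefiles entries → Spec_find_duplicate_output_makefiles entries (find_duplicate_output_makefiles entries)

-- ===== LEMMAS AND PROOFS =====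

-- pass one never overwrites: an existing binding survives the whole fold
theorem pvStepB_preserves (l : List (Int × List (String × String)))
    (d : PySem.Dict (Option String) Int) (k : Option String) (v : Int)
    (h : d.get? k = some v) : (l.foldl pvStepB d).get? k = some v := by
  induction l generalizing d with
  | nil => exact h
  | cons p t ih =>
    simp only [List.foldl_cons, pvStepB]
    split
    · exact ih d h
    · rename_i hc
      apply ih
      rcases eq_or_ne k (pvKey p.2) with rfl | hne
      · rw [PySem.Dict.contains_eq_isSome_get?, h] at hc; simp at hc
      · rw [PySem.Dict.get?_insert_of_ne (hne := hne)]; exact h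

-- main invariant: A's fold from (errs, d) equals B's second pass over the same
-- suffix using the FULL first-occurrence dict D, provided D extends pass one over
-- the suffix from d, d's stored indices are below all upcoming indices, and the
-- upcoming indices are strictly increasing
theorem pvMain (l : List (Int × List (String × String))) (errs : List String)
    (d D : PySem.Dict (Option String) Int)
    (hD : l.foldl pvStepB d = D)
    (hlt : ∀ p ∈ l, ∀ i, d.get? (pvKey p.2) = some i → i < p.1)
    (hinc : l.Pairwise (fun p q => p.1 < q.1)) :
    (l.foldl pvStepA (errs, d)).1 =
      l.foldl (fun errors p =>
        let first := D.getD (pvKey p.2) 0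
        if first ≠ p.1 then errors ++ [pvMsg p.1 (pvKey p.2) first] else errors) errs := by
  induction l generalizing errs d with
  | nil => rfl
  | cons p t ih =>
    have hpt := List.pairwise_cons.mp hinc
    simp only [List.foldl_cons] at hD ⊢
    cases hgd : d.get? (pvKey p.2) with
    | some f =>
      have hc : d.contains (pvKey p.2) = true := by
        rw [PySem.Dict.contains_eq_isSome_get?, hgd]; rfl
      have hB : pvStepB d p = d := by simp only [pvStepB, hc, if_true]
      rw [hB] at hD
      have hget : D.get? (pvKey p.2) = some f := hD ▸ pvStepB_preserves t d _ _ hgd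
      have hfd : D.getD (pvKey p.2) 0 = f :=
        PySem.Dict.getD_of_get?_eq_some _ _ hget
      have hfne : f ≠ p.1 := ne_of_lt (hlt p (List.mem_cons_self) f hgd)
      simp only [pvStepA, hgd, hfd, ne_eq, if_pos hfne]
      exact ih (errs ++ [pvMsg p.1 (pvKey p.2) f]) d hD
        (fun q hq i hi => hlt q (List.mem_cons_of_mem _ hq) i hi) hpt.2
    | none =>
      have hc : d.contains (pvKey p.2) = false := by
        rw [PySem.Dict.contains_eq_isSome_get?, hgd]; rfl
      have hB : pvStepB d p = d.insert (pvKey p.2) p.1 := by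
        simp only [pvStepB, hc]; rfl
      rw [hB] at hD
      have hget : D.get? (pvKey p.2) = some p.1 :=
        hD ▸ pvStepB_preserves t _ _ _ (PySem.Dict.get?_insert_self ..)
      have hfd : D.getD (pvKey p.2) 0 = p.1 :=
        PySem.Dict.getD_of_get?_eq_some _ _ hget
      simp only [pvStepA, hgd, hfd, ne_eq, not_true_eq_false, if_false]
      refine ih errs (d.insert (pvKey p.2) p.1) hD ?_ hpt.2
      intro q hq i hi
      rcases eq_or_ne (pvKey q.2) (pvKey p.2) with he | hne
      · rw [he, PySem.Dict.get?_insert_self] at hi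
        cases hi; exact hpt.1 q hq
      · rw [PySem.Dict.get?_insert_of_ne (hne := hne)] at hi
        exact hlt q (List.mem_cons_of_mem _ hq) i hi

-- ===== VERDICT (by name: the statement is the Claim_ definition above) =====
theorem find_duplicate_output_makefiles_spec : Claim_equal_find_duplicate_output_makefiles := by
  intro entries _
  show _ = _
  unfold find_duplicate_output_makefiles find_duplicate_output_makefiles_alt
  exact pvMain (PySem.List.enumerate entries 0) [] PySem.Dict.empty _ rfl
    (fun p _ i hi => by simp [PySem.Dict.get?_empty] at hi)
    (PySem.List.pairwise_lt_enumerate entries 0)
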